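-- pv_equiv track=rewrite | github.com/SamuelLarkin/AdventOfCode2018 | 20/map.py | create_rooms
-- ===== SOURCE A (Python) =====
-- from collections import defaultdict
--
-- roses = {
--         'N': (0,1),
--         'S': (0,-1),
--         'W': (-1,0),
--         'E': (1,0),
--         }
--
-- def _move(position, direction):
--     d = roses[direction]
--     return (position[0]+d[0], position[1]+d[1])
--
-- def create_rooms(regex):
--     '''
--     ^ENWWW(NEEE|SSE(EE|N))$
--     ^WSSEESWWWNW(S|NENNEEEENN(ESSSSW(NWSW|SSEN)|WSWWN(E|WWS(E|SS))))$
--     '''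
--     stack = []
--     rooms = defaultdict(lambda: 10000)
--     distance = 0
--     position = (0,0)
--     for instruction in regex:
--         if instruction == '^':
--             pass
--         if instruction == '$':
--             # We are done parsing.
--             return rooms
--         elif instruction in 'NEWS':
--             distance += 1
--             position = _move(position, instruction)
--             rooms[position] = min(distance, rooms[position])
--         elif instruction == '(':
--             stack.append(position)
--         elif instruction == ')':
--             position = stack.pop()
--             distance = rooms[position]
--         elif instruction == '|':
--             position = stack[-1]
--             distance = rooms[position]
--
--     return rooms
-- ===== SOURCE B (Python) =====
-- from collections import defaultdict
--
-- roses = {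
--         'N': (0,1),
--         'S': (0,-1),
--         'W': (-1,0),
--         'E': (1,0),
--         }
--
-- def _move(position, direction):
--     d = roses[direction]
--     return (position[0]+d[0], position[1]+d[1])
--
-- def create_rooms(regex):
--     # Recursive-descent parser over a shared index instead of a flat loop
--     # with an explicit stack; same defaultdict(lambda: 10000) semantics.
--     rooms = defaultdict(lambda: 10000)
--
--     def parse(i, position, distance):
--         # Parse a group body starting at index i with branch-start `position`.
--         # Returns the index just past the closing ')', or None if '$' or the
--         # end of the string terminates parsing altogether.
--         start = position
--         while i < len(regex):
--             c = regex[i]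
--             i += 1
--             if c == '$':
--                 return None
--             elif c in roses:
--                 distance += 1
--                 position = _move(position, c)
--                 rooms[position] = min(distance, rooms[position])
--             elif c == '(':
--                 i = parse(i, position, distance)
--                 if i is None:
--                     return None
--                 distance = rooms[position]
--             elif c == '|':
--                 position = start
--                 distance = rooms[start]
--             elif c == ')':
--                 return i
--         return None
--
--     parse(0, (0, 0), 0)
--     return rooms
-- ===== Notes on version B (the rewrite author's own statement) =====
-- stated objective: alternative
-- what changed: Replaces A's flat character loop with an explicit position stack by a recursive-descent parser over a shared index: a helper parse(i, position, distance) consumes a group body, recursing when a group opens and returning the continuation index when it closes, re-reading distance = rooms[branch start] at each alternation bar and after each group; same defaultdict(lambda:10000) semantics.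
-- outside the precondition, e.g. on create_rooms(')'): A raises IndexError, B returns {}; on create_rooms('|'): A raises IndexError, B returns {(0, 0): 10000}
import Mathlib
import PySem

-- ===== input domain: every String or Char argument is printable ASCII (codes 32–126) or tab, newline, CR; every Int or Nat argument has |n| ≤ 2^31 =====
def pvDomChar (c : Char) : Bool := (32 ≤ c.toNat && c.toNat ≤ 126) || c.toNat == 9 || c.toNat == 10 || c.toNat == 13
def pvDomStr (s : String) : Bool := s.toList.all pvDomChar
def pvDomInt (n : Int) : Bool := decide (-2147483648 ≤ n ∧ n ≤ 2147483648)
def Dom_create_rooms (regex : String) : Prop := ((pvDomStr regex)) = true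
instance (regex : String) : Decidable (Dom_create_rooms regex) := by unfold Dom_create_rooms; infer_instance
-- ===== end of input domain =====

-- B is an 'alternative' decomposition: a recursive-descent parser over the string
-- instead of A's flat loop with an explicit stack; same cost, same return value.

-- rooms is a defaultdict(lambda: 10000): reading a missing key INSERTS it with 10000.
-- ddGet d p = (d[p], d after the read), shared defaultdict-read helper of both ports.
def ddGet (d : PySem.Dict (Int × Int) Int) (p : Int × Int) : Int × PySem.Dict (Int × Int) Int :=
  match d.get? p with
  | some v => (v, d)
  | none => (10000, d.insert p 10000)

-- _move from the Python module (roses lookup inlined as branches)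
def pvMove (p : Int × Int) (c : Char) : Int × Int :=
  if c = 'N' then (p.1, p.2 + 1)
  else if c = 'S' then (p.1, p.2 - 1)
  else if c = 'W' then (p.1 - 1, p.2)
  else (p.1 + 1, p.2)

-- dict[(x,y)] = d rendered as the required flat triple (x, y, d)
def pvItems (d : PySem.Dict (Int × Int) Int) : List (Int × Int × Int) :=
  d.items.map (fun q => (q.1.1, q.1.2, q.2))

-- ===== PORT A =====
-- A's for-loop over regex with the explicit stack; early return on '$'.
def aLoop (chars : List Char) (stack : List (Int × Int)) (rooms : PySem.Dict (Int × Int) Int)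
    (dist : Int) (pos : Int × Int) : PySem.Dict (Int × Int) Int :=
  match chars with
  | [] => rooms
  | c :: rest =>
    if c = '$' then rooms
    else if c = 'N' ∨ c = 'E' ∨ c = 'W' ∨ c = 'S' then
      let dist' := dist + 1
      let pos' := pvMove pos c
      let g := ddGet rooms pos'                  -- RHS read rooms[position] (defaultdict)
      aLoop rest stack (g.2.insert pos' (min dist' g.1)) dist' pos'
    else if c = '(' then
      aLoop rest (pos :: stack) rooms dist pos
    else if c = ')' then
      match stack with
      | [] => rooms                              -- Python raises IndexError here; excluded by Pre_
      | p :: st =>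
        let g := ddGet rooms p                   -- distance = rooms[position] (defaultdict read)
        aLoop rest st g.2 g.1 p
    else if c = '|' then
      match stack with
      | [] => rooms                              -- Python raises IndexError here; excluded by Pre_
      | p :: st =>
        let g := ddGet rooms p
        aLoop rest (p :: st) g.2 g.1 p
    else aLoop rest stack rooms dist pos         -- '^' and any other character: no-op

def create_rooms (regex : String) : List (Int × Int × Int) :=
  pvItems (aLoop regex.toList [] PySem.Dict.empty 0 (0, 0))

-- ===== PORT B =====
-- widen the length bound carried by a remainder (Source B needs no such bookkeeping;
-- here it justifies termination of the nested recursion)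
def pvRelax {n m : Nat} (h : n ≤ m)
    (x : Option {l : List Char // l.length < n} × PySem.Dict (Int × Int) Int) :
    Option {l : List Char // l.length < m} × PySem.Dict (Int × Int) Int :=
  (x.1.map (fun l => ⟨l.1, Nat.lt_of_lt_of_le l.2 h⟩), x.2)

-- Source B's parse(i, position, distance): consumes a group body; returns the suffix just
-- past the closing ')' (as `some rem`), or `none` when '$' or the end of the string
-- terminates parsing altogether; threads the rooms dict through.
def parseB (chars : List Char) (start pos : Int × Int) (rooms : PySem.Dict (Int × Int) Int)
    (dist : Int) :
    Option {rem : List Char // rem.length < chars.length} × PySem.Dict (Int × Int) Int :=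
  match chars with
  | [] => (none, rooms)
  | c :: rest =>
    if c = '$' then (none, rooms)
    else if c = 'N' ∨ c = 'E' ∨ c = 'W' ∨ c = 'S' then
      let dist' := dist + 1
      let pos' := pvMove pos c
      let g := ddGet rooms pos'
      pvRelax (Nat.le_succ _) (parseB rest start pos' (g.2.insert pos' (min dist' g.1)) dist')
    else if c = '(' then
      match (parseB rest pos pos rooms dist).1 with
      | none => (none, (parseB rest pos pos rooms dist).2)
      | some rem =>
        let g := ddGet (parseB rest pos pos rooms dist).2 pos   -- distance = rooms[position]
        pvRelax (Nat.le_succ_of_le (Nat.le_of_lt rem.2)) (parseB rem.1 start pos g.2 g.1)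
    else if c = ')' then
      (some ⟨rest, Nat.lt_succ_self _⟩, rooms)
    else if c = '|' then
      let g := ddGet rooms start                 -- distance = rooms[start] (defaultdict read)
      pvRelax (Nat.le_succ _) (parseB rest start start g.2 g.1)
    else
      pvRelax (Nat.le_succ _) (parseB rest start pos rooms dist)
termination_by chars.length
decreasing_by all_goals simp [List.length_cons] <;> omega

def create_rooms_alt (regex : String) : List (Int × Int × Int) :=
  pvItems (parseB regex.toList (0, 0) (0, 0) PySem.Dict.empty 0).2

-- ===== PRECONDITION & SPEC =====
-- Python A raises IndexError (pop / [-1] on the empty stack) exactly when, before the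
-- first '$', a ')' or '|' occurs at parenthesis depth 0; Pre_ excludes exactly those.
def pvBalOK : List Char → Nat → Bool
  | [], _ => true
  | c :: rest, d =>
    if c = '$' then true
    else if c = '(' then pvBalOK rest (d + 1)
    else if c = ')' then d != 0 && pvBalOK rest (d - 1)
    else if c = '|' then d != 0 && pvBalOK rest d
    else pvBalOK rest d

def Pre_create_rooms (regex : String) : Prop := pvBalOK regex.toList 0 = true
instance (regex : String) : Decidable (Pre_create_rooms regex) := by
  unfold Pre_create_rooms; infer_instance

def pvWitness_create_rooms : String := "^ENWWW(NEEE|SSE(EE|N))$"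

def Spec_create_rooms (regex : String) (out : List (Int × Int × Int)) : Prop := out = create_rooms_alt regex
instance (regex : String) (out : List (Int × Int × Int)) : Decidable (Spec_create_rooms regex out) := by unfold Spec_create_rooms; infer_instance

-- ===== CLAIM (what is proved, stated in full; the proofs are below) =====
def Claim_equal_create_rooms : Prop := ∀ (regex : String), Dom_create_rooms regex → Pre_create_rooms regex → Spec_create_rooms regex (create_rooms regex)

-- ===== LEMMAS AND PROOFS =====

-- forget the length bound of a parse result
def pvStrip {n : Nat} (x : Option {l : List Char // l.length < n} × PySem.Dict (Int × Int) Int) :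
    Option (List Char) × PySem.Dict (Int × Int) Int :=
  (x.1.map Subtype.val, x.2)

-- what A's machine does after B's parse of a group body returns
def pvAfter (start : Int × Int) (stack : List (Int × Int))
    (x : Option (List Char) × PySem.Dict (Int × Int) Int) : PySem.Dict (Int × Int) Int :=
  match x.1 with
  | none => x.2
  | some rem => aLoop rem stack (ddGet x.2 start).2 (ddGet x.2 start).1 start

theorem pvStrip_pvRelax {n m : Nat} (h : n ≤ m)
    (x : Option {l : List Char // l.length < n} × PySem.Dict (Int × Int) Int) :
    pvStrip (pvRelax h x) = pvStrip x := by
  rcases x with ⟨o, r⟩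
  cases o <;> rfl

theorem pvRelax_snd {n m : Nat} (h : n ≤ m)
    (x : Option {l : List Char // l.length < n} × PySem.Dict (Int × Int) Int) :
    (pvRelax h x).2 = x.2 := rfl

theorem map_val_pvRelax {n m : Nat} (h : n ≤ m)
    (x : Option {l : List Char // l.length < n} × PySem.Dict (Int × Int) Int) :
    Option.map Subtype.val (pvRelax h x).1 = Option.map Subtype.val x.1 := by
  rcases x with ⟨o, r⟩
  cases o <;> rfl

-- Core simulation: with a nonempty stack, A's machine run over `chars` equals
-- B's parse of the same characters followed by A's post-group step.
theorem aLoop_eq_parseB (n : Nat) : ∀ (chars : List Char), chars.length ≤ n →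
    ∀ (start pos : Int × Int) (rooms : PySem.Dict (Int × Int) Int) (dist : Int)
      (stack : List (Int × Int)),
    aLoop chars (start :: stack) rooms dist pos
      = pvAfter start stack (pvStrip (parseB chars start pos rooms dist)) := by
  induction n with
  | zero =>
    intro chars hlen start pos rooms dist stack
    cases chars with
    | nil => simp [aLoop, parseB, pvStrip, pvAfter]
    | cons c rest => simp at hlen
  | succ n ih =>
    intro chars hlen start pos rooms dist stack
    cases chars with
    | nil => simp [aLoop, parseB, pvStrip, pvAfter]
    | cons c rest =>
      simp only [List.length_cons, Nat.succ_le_succ_iff] at hlen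
      rw [aLoop, parseB]
      by_cases h1 : c = '$'
      · simp [h1, pvStrip, pvAfter]
      by_cases h2 : c = 'N' ∨ c = 'E' ∨ c = 'W' ∨ c = 'S'
      · simp only [if_neg h1, if_pos h2]
        rw [ih rest hlen, pvStrip_pvRelax]
      by_cases h3 : c = '('
      · simp only [if_neg h1, if_neg h2, if_pos h3]
        rw [ih rest hlen]
        rcases hq : (parseB rest pos pos rooms dist).1 with _ | rem
        · simp [pvAfter, pvStrip, hq]
        · have hrem : rem.1.length ≤ n := le_trans (Nat.le_of_lt rem.2) hlen
          simp only [hq, pvAfter, pvStrip, Option.map_some]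
          rw [ih rem.1 hrem]
          simp only [pvAfter, pvStrip, map_val_pvRelax, pvRelax_snd]
      by_cases h4 : c = ')'
      · simp [h4, pvAfter, pvStrip]
      by_cases h5 : c = '|'
      · simp only [if_neg h1, if_neg h2, if_neg h3, if_neg h4, if_pos h5]
        rw [ih rest hlen, pvStrip_pvRelax]
      · simp only [if_neg h1, if_neg h2, if_neg h3, if_neg h4, if_neg h5]
        rw [ih rest hlen, pvStrip_pvRelax]

-- B's parse of a well-nested group body (depth d+1) returns a remainder that is
-- well-nested at depth d.
theorem parseB_bal (n : Nat) : ∀ (chars : List Char), chars.length ≤ n →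
    ∀ (d : Nat) (start pos : Int × Int) (rooms : PySem.Dict (Int × Int) Int) (dist : Int)
      (rem : List Char),
    pvBalOK chars (d + 1) = true →
    (pvStrip (parseB chars start pos rooms dist)).1 = some rem →
    pvBalOK rem d = true := by
  induction n with
  | zero =>
    intro chars hlen d start pos rooms dist rem hbal hsome
    cases chars with
    | nil => simp [parseB, pvStrip] at hsome
    | cons c rest => simp at hlen
  | succ n ih =>
    intro chars hlen d start pos rooms dist rem hbal hsome
    cases chars with
    | nil => simp [parseB, pvStrip] at hsome
    | cons c rest =>
      simp only [List.length_cons, Nat.succ_le_succ_iff] at hlen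
      rw [parseB] at hsome
      rw [pvBalOK] at hbal
      by_cases h1 : c = '$'
      · simp [h1, pvStrip] at hsome
      by_cases h2 : c = 'N' ∨ c = 'E' ∨ c = 'W' ∨ c = 'S'
      · have hns : ¬ c = '(' ∧ ¬ c = ')' ∧ ¬ c = '|' := by
          rcases h2 with h | h | h | h <;> subst h <;> exact ⟨by decide, by decide, by decide⟩
        simp only [if_neg h1, if_pos h2] at hsome
        simp only [if_neg h1, if_neg hns.1, if_neg hns.2.1, if_neg hns.2.2] at hbal
        rw [pvStrip_pvRelax] at hsome
        exact ih rest hlen d _ _ _ _ rem hbal hsome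
      by_cases h3 : c = '('
      · simp only [if_neg h1, if_neg h2, if_pos h3] at hsome
        simp only [if_neg h1, if_pos h3] at hbal
        rcases hq : (parseB rest pos pos rooms dist).1 with _ | rem1
        · rw [hq] at hsome; simp [pvStrip] at hsome
        · rw [hq] at hsome
          simp only at hsome
          rw [pvStrip_pvRelax] at hsome
          have hb1 : pvBalOK rem1.1 (d + 1) = true :=
            ih rest hlen (d + 1) pos pos rooms dist rem1.1 hbal (by simp [pvStrip, hq])
          have hr1 : rem1.1.length ≤ n := le_trans (Nat.le_of_lt rem1.2) hlen
          exact ih rem1.1 hr1 d _ _ _ _ rem hb1 hsome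
      by_cases h4 : c = ')'
      · simp only [if_neg h1, if_neg h2, if_neg h3, if_pos h4, pvStrip, Option.map_some] at hsome
        simp only [if_neg h1, if_neg h3, if_pos h4] at hbal
        simp only [Bool.and_eq_true] at hbal
        cases hsome
        simpa using hbal.2
      by_cases h5 : c = '|'
      · simp only [if_neg h1, if_neg h2, if_neg h3, if_neg h4, if_pos h5] at hsome
        simp only [if_neg h1, if_neg h3, if_neg h4, if_pos h5, Bool.and_eq_true] at hbal
        rw [pvStrip_pvRelax] at hsome
        exact ih rest hlen d _ _ _ _ rem hbal.2 hsome
      · simp only [if_neg h1, if_neg h2, if_neg h3, if_neg h4, if_neg h5] at hsome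
        simp only [if_neg h1, if_neg h3, if_neg h4, if_neg h5] at hbal
        rw [pvStrip_pvRelax] at hsome
        exact ih rest hlen d _ _ _ _ rem hbal hsome

-- Top level: on balanced input A's machine with the empty stack equals B's parse,
-- and B's parse consumes everything (never returns a remainder).
theorem aLoop_nil_eq_parseB (n : Nat) : ∀ (chars : List Char), chars.length ≤ n →
    ∀ (start pos : Int × Int) (rooms : PySem.Dict (Int × Int) Int) (dist : Int),
    pvBalOK chars 0 = true →
    aLoop chars [] rooms dist pos = (parseB chars start pos rooms dist).2
      ∧ (pvStrip (parseB chars start pos rooms dist)).1 = none := by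
  induction n with
  | zero =>
    intro chars hlen start pos rooms dist hbal
    cases chars with
    | nil => simp [aLoop, parseB, pvStrip]
    | cons c rest => simp at hlen
  | succ n ih =>
    intro chars hlen start pos rooms dist hbal
    cases chars with
    | nil => simp [aLoop, parseB, pvStrip]
    | cons c rest =>
      simp only [List.length_cons, Nat.succ_le_succ_iff] at hlen
      rw [pvBalOK] at hbal
      rw [aLoop, parseB]
      by_cases h1 : c = '$'
      · simp [h1, pvStrip]
      by_cases h2 : c = 'N' ∨ c = 'E' ∨ c = 'W' ∨ c = 'S'
      · have hns : ¬ c = '(' ∧ ¬ c = ')' ∧ ¬ c = '|' := by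
          rcases h2 with h | h | h | h <;> subst h <;> exact ⟨by decide, by decide, by decide⟩
        simp only [if_neg h1, if_neg hns.1, if_neg hns.2.1, if_neg hns.2.2] at hbal
        simp only [if_neg h1, if_pos h2]
        simp only [pvRelax]
        have := ih rest hlen start (pvMove pos c)
          ((ddGet rooms (pvMove pos c)).2.insert (pvMove pos c)
            (min (dist + 1) (ddGet rooms (pvMove pos c)).1)) (dist + 1) hbal
        refine ⟨this.1, ?_⟩
        have h2' := this.2
        simp only [pvStrip] at h2' ⊢
        simp [Option.map_map]
        simpa using h2'
      by_cases h3 : c = '('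
      · simp only [if_neg h1, if_pos h3] at hbal
        simp only [if_neg h1, if_neg h2, if_pos h3]
        rw [aLoop_eq_parseB n rest hlen pos pos rooms dist []]
        rcases hq : (parseB rest pos pos rooms dist).1 with _ | rem1
        · simp only [hq, pvAfter, pvStrip]
          simp
        · have hb1 : pvBalOK rem1.1 0 = true :=
            parseB_bal n rest hlen 0 pos pos rooms dist rem1.1 hbal (by simp [pvStrip, hq])
          have hr1 : rem1.1.length ≤ n := le_trans (Nat.le_of_lt rem1.2) hlen
          simp only [hq, pvAfter, pvStrip, Option.map_some]
          have := ih rem1.1 hr1 start pos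
            ((ddGet (parseB rest pos pos rooms dist).2 pos).2)
            ((ddGet (parseB rest pos pos rooms dist).2 pos).1) hb1
          refine ⟨this.1, ?_⟩
          have h2' := this.2
          simp only [pvStrip, pvRelax] at h2' ⊢
          simp [Option.map_map]
          simpa using h2'
      by_cases h4 : c = ')'
      · simp only [if_neg h1, if_neg h3, if_pos h4, Bool.and_eq_true] at hbal
        simp at hbal
      by_cases h5 : c = '|'
      · simp only [if_neg h1, if_neg h3, if_neg h4, if_pos h5, Bool.and_eq_true] at hbal
        simp at hbal
      · simp only [if_neg h1, if_neg h3, if_neg h4, if_neg h5] at hbal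
        simp only [if_neg h1, if_neg h2, if_neg h3, if_neg h4, if_neg h5]
        simp only [pvRelax]
        have := ih rest hlen start pos rooms dist hbal
        refine ⟨this.1, ?_⟩
        have h2' := this.2
        simp only [pvStrip] at h2' ⊢
        simp [Option.map_map]
        simpa using h2'

-- ===== VERDICT (by name: the statement is the Claim_ definition above) =====
theorem create_rooms_spec : Claim_equal_create_rooms := by
  intro regex _ hpre
  unfold Spec_create_rooms create_rooms create_rooms_alt
  have h := (aLoop_nil_eq_parseB regex.toList.length regex.toList le_rfl (0, 0) (0, 0)
    PySem.Dict.empty 0 hpre).1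
  rw [h]
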